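-- pv_equiv track=rewrite | github.com/TheAlgorithm-SimpleChinese/Python | Pythontip算法题/中等/本原串.py | f
-- ===== SOURCE A (Python) =====
-- def f(n):
--     if n == 1:
--         return 2
--     all = pow(2, n, 2017)
--     for i in range(1, n // 2 + 1):
--         if n % i == 0:
--             all -= f(i)
--             if all < 0:
--                 all += 2017
--     return all % 2017
-- ===== SOURCE B (Python) =====
-- def f(n):
--     if n == 1:
--         return 2
--     divs = []
--     i = 1
--     while i * i <= n:
--         if n % i == 0:
--             divs.append(i)
--             j = n // i
--             if j != n and j != i:
--                 divs.append(j)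
--         i += 1
--     s = sum(f(d) for d in divs)
--     return (pow(2, n, 2017) - s) % 2017
-- ===== Notes on version B (the rewrite author's own statement) =====
-- stated objective: faster
-- what changed: A scans all of range(1, n//2+1) on every call to find divisors; B enumerates divisors in O(sqrt(n)) time by collecting each small divisor i (i*i <= n) together with its cofactor n//i, then applies the same recurrence f(n) = (2^n - sum of f over proper divisors) mod 2017 with a single subtraction instead of A's running decrement-and-renormalize loop.
import Mathlib
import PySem

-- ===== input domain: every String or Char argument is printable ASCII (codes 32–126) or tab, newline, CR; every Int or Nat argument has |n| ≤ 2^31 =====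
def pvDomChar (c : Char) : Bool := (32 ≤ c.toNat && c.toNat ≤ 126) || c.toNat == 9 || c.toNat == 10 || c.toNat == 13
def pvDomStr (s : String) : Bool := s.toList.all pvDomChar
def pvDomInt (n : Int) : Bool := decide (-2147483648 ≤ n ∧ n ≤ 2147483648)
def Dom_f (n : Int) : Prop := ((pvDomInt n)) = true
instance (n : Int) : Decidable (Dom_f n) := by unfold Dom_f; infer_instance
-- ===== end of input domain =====

-- B replaces A's O(n) divisor scan per call (range(1, n//2+1)) by an O(√n) paired
-- divisor enumeration; same recurrence, same results (measured faster).

-- Shared port of the builtin pow(2, n, 2017). For n < 0 CPython returns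
-- inverse(2, 2017)^(-n) % 2017, and inverse(2, 2017) = 1009 (2017 is odd),
-- so the negative branch is exact.
def pyPow2Mod2017 (n : Int) : Int :=
  if 0 ≤ n then PySem.Int.powMod 2 n.toNat 2017
  else PySem.Int.powMod 1009 (-n).toNat 2017

-- termination measure fact for f's recursive calls
lemma f_dec (n i : Int) (h1 : 1 ≤ i) (h2 : i < PySem.Int.floordiv n 2 + 1) :
    i.toNat < n.toNat := by
  have h3 : PySem.Int.floordiv n 2 = n / 2 := PySem.Int.floordiv_eq_ediv_of_pos (by norm_num)
  have h4 : i < n / 2 + 1 := by rw [← h3]; exact h2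
  omega

-- ===== PORT A =====
def f (n : Int) : Int :=
  if n = 1 then 2
  else
    PySem.Int.mod
      ((PySem.List.pyRange 1 (PySem.Int.floordiv n 2 + 1) 1).attach.foldl
        (fun all i =>
          if PySem.Int.mod n i.1 = 0 then
            if all - f i.1 < 0 then all - f i.1 + 2017 else all - f i.1
          else all)
        (pyPow2Mod2017 n))
      2017
termination_by n.toNat
decreasing_by
  all_goals exact f_dec n i.1 (PySem.List.mem_pyRange_one.mp i.2).1 (PySem.List.mem_pyRange_one.mp i.2).2

-- ===== PORT B =====
-- termination measure fact for the while loop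
lemma divLoop_dec (n i : Int) (h : i * i ≤ n) :
    (n + 1 - (i + 1)).toNat < (n + 1 - i).toNat := by
  have h0 : 0 ≤ n := le_trans (mul_self_nonneg i) h
  have h1 : 2 * i ≤ n + 1 := by nlinarith [sq_nonneg (i - 1)]
  omega

-- the 'while i * i <= n' loop of B, building the divisor list
def divLoop (n i : Int) (divs : List Int) : List Int :=
  if hle : i * i ≤ n then
    if PySem.Int.mod n i = 0 then
      divLoop n (i + 1)
        ((divs ++ [i]) ++
          (if PySem.Int.floordiv n i ≠ n ∧ PySem.Int.floordiv n i ≠ i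
           then [PySem.Int.floordiv n i] else []))
    else divLoop n (i + 1) divs
  else divs
termination_by (n + 1 - i).toNat
decreasing_by
  all_goals exact divLoop_dec n i hle

-- termination fact for f_alt: everything divLoop collects is in [1, n)
lemma mem_divLoop (n : Int) (hn : n ≠ 1) (k : Nat) :
    ∀ (i : Int) (acc : List Int), (n + 1 - i).toNat = k → 1 ≤ i →
      ∀ d ∈ divLoop n i acc, d ∈ acc ∨ (1 ≤ d ∧ d < n) := by
  induction k using Nat.strong_induction_on with
  | _ k IH =>
    intro i acc hk hi d hd
    rw [divLoop] at hd
    by_cases hii : i * i ≤ n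
    · have hin : i ≤ n := by nlinarith
      have hnn : 1 ≤ n := by nlinarith
      have hn2 : 2 ≤ n := by omega
      have hlt : i < n := by
        rcases lt_or_ge i n with h | h
        · exact h
        · exfalso; nlinarith
      rw [dif_pos hii] at hd
      have hmeas : (n + 1 - (i + 1)).toNat < k := by omega
      by_cases hmod : PySem.Int.mod n i = 0
      · rw [if_pos hmod] at hd
        rcases IH _ hmeas (i + 1) _ rfl (by omega) d hd with hmem | hb
        · simp only [List.mem_append] at hmem
          rcases hmem with (hmem | hmem) | hmem
          · exact Or.inl hmem
          · simp at hmem; subst hmem; exact Or.inr ⟨hi, hlt⟩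
          · right
            have hfd : PySem.Int.floordiv n i = n / i :=
              PySem.Int.floordiv_eq_ediv_of_pos (by omega)
            by_cases hc : PySem.Int.floordiv n i ≠ n ∧ PySem.Int.floordiv n i ≠ i
            · rw [if_pos hc] at hmem
              simp at hmem; subst hmem
              constructor
              · rw [hfd]
                have := (Int.le_ediv_iff_mul_le (a := 1) (b := n) (c := i) (by omega)).mpr (by omega)
                omega
              · have h1 : n / i ≤ n := Int.ediv_le_self i (by omega)
                rw [hfd]; rcases lt_or_ge (n / i) n with h | h
                · exact h
                · exfalso; exact hc.1 (by omega)
            · rw [if_neg hc] at hmem; simp at hmem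
        · exact Or.inr hb
      · rw [if_neg hmod] at hd
        exact IH _ hmeas (i + 1) _ rfl (by omega) d hd
    · rw [dif_neg hii] at hd
      exact Or.inl hd

lemma mem_divLoop' (n : Int) (hn : n ≠ 1) (d : Int) (hd : d ∈ divLoop n 1 []) :
    1 ≤ d ∧ d < n := by
  rcases mem_divLoop n hn _ 1 [] rfl (le_refl 1) d hd with h | h
  · simp at h
  · exact h

-- termination measure fact for f_alt's recursive calls
lemma f_alt_dec (n d : Int) (hn : ¬ n = 1) (hd : d ∈ divLoop n 1 []) :
    d.toNat < n.toNat := by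
  have hb := mem_divLoop' n hn d hd
  omega

def f_alt (n : Int) : Int :=
  if h : n = 1 then 2
  else
    PySem.Int.mod
      (pyPow2Mod2017 n - ((divLoop n 1 []).attach.map (fun d => f_alt d.1)).sum)
      2017
termination_by n.toNat
decreasing_by
  exact f_alt_dec n d.1 h d.2

-- ===== PRECONDITION & SPEC =====
def Spec_f (n : Int) (out : Int) : Prop := out = f_alt n
instance (n : Int) (out : Int) : Decidable (Spec_f n out) := by unfold Spec_f; infer_instance

-- ===== CLAIM (what is proved, stated in full; the proofs are below) =====
def Claim_equal_f : Prop := ∀ (n : Int), Dom_f n → Spec_f n (f n)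

-- ===== LEMMAS AND PROOFS =====

-- reference function: the common value of both ports on natural arguments
def pvF (m : Nat) : Int :=
  if m = 1 then 2
  else (PySem.Int.powMod 2 m 2017 - ∑ d ∈ m.properDivisors.attach, pvF d.1) % 2017
termination_by m
decreasing_by exact (Nat.mem_properDivisors.mp d.2).2

lemma pvF_eq (m : Nat) (hm : m ≠ 1) :
    pvF m = (PySem.Int.powMod 2 m 2017 - ∑ d ∈ m.properDivisors, pvF d) % 2017 := by
  rw [pvF, if_neg hm, Finset.sum_attach]

lemma pvF_nonneg (m : Nat) : 0 ≤ pvF m := by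
  rw [pvF]; split_ifs
  · norm_num
  · exact Int.emod_nonneg _ (by norm_num)

lemma pvF_lt (m : Nat) : pvF m < 2017 := by
  rw [pvF]; split_ifs
  · norm_num
  · exact Int.emod_lt_of_pos _ (by norm_num)

lemma pyPow_natCast (m : Nat) : pyPow2Mod2017 (m : Int) = PySem.Int.powMod 2 m 2017 := by
  rw [pyPow2Mod2017, if_pos (Int.natCast_nonneg m)]
  simp

-- A's running-subtraction loop computes a single subtraction modulo 2017
lemma foldA (n : Int) (g : Int → Int) :
    ∀ (l : List Int) (a : Int), 0 ≤ a → a < 2017 → (∀ i ∈ l, 0 ≤ g i ∧ g i < 2017) →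
      l.foldl (fun all i =>
          if PySem.Int.mod n i = 0 then
            if all - g i < 0 then all - g i + 2017 else all - g i
          else all) a
        = (a - ((l.filter (fun i => decide (PySem.Int.mod n i = 0))).map g).sum) % 2017 := by
  intro l
  induction l with
  | nil =>
      intro a h1 h2 _
      simp only [List.foldl_nil, List.filter_nil, List.map_nil, List.sum_nil, sub_zero]
      exact (Int.emod_eq_of_lt h1 h2).symm
  | cons x tl ih =>
      intro a h1 h2 hg
      have hgx := hg x (by simp)
      simp only [List.foldl_cons, List.filter_cons]
      by_cases hx : PySem.Int.mod n x = 0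
      · rw [if_pos hx]
        have hdec : decide (PySem.Int.mod n x = 0) = true := by simp [hx]
        rw [hdec]
        simp only [if_true, List.map_cons, List.sum_cons]
        set a' := if a - g x < 0 then a - g x + 2017 else a - g x with ha'
        have hb1 : 0 ≤ a' := by rw [ha']; split_ifs <;> omega
        have hb2 : a' < 2017 := by rw [ha']; split_ifs <;> omega
        rw [ih a' hb1 hb2 (fun i hi => hg i (by simp [hi]))]
        set S := ((tl.filter (fun i => decide (PySem.Int.mod n i = 0))).map g).sum with hS
        rw [ha']
        split_ifs with hneg
        · rw [show a - g x + 2017 - S = (a - (g x + S)) + 2017 * 1 by ring,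
             Int.add_mul_emod_self_left]
        · rw [show a - g x - S = a - (g x + S) by ring]
      · rw [if_neg hx]
        have hdec : decide (PySem.Int.mod n x = 0) = false := by simp [hx]
        rw [hdec]
        simp only [if_false, Bool.false_eq_true]
        exact ih a h1 h2 (fun i hi => hg i (by simp [hi]))

-- A's filtered range-sum is the sum over the divisors in Icc 1 k
lemma listsum_eq (m : Nat) (g : Nat → Int) : ∀ (k : Nat),
    (((PySem.List.pyRange 1 ((k : Int) + 1) 1).filter
        (fun i => decide (PySem.Int.mod (m : Int) i = 0))).map (fun i => g i.toNat)).sum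
      = ∑ d ∈ (Finset.Icc 1 k).filter (fun d => d ∣ m), g d := by
  intro k
  induction k with
  | zero =>
      rw [show ((0 : Nat) : Int) + 1 = 1 by norm_num,
         PySem.List.pyRange_one_eq_nil (by norm_num)]
      simp
  | succ k ih =>
      have hsplit : PySem.List.pyRange 1 (((k + 1 : Nat) : Int) + 1) 1
          = PySem.List.pyRange 1 ((k : Int) + 1) 1 ++ [(k : Int) + 1] := by
        push_cast
        exact PySem.List.pyRange_one_succ_right (by omega)
      rw [hsplit, List.filter_append, List.map_append, List.sum_append, ih]
      have hR : ∑ d ∈ (Finset.Icc 1 (k + 1)).filter (fun d => d ∣ m), g d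
          = ∑ d ∈ (Finset.Icc 1 k).filter (fun d => d ∣ m), g d
            + (if (k + 1) ∣ m then g (k + 1) else 0) := by
        rw [Finset.sum_filter, Finset.sum_filter, Finset.sum_Icc_succ_top (by omega)]
      rw [hR]
      congr 1
      have hcast : ((k : Int) + 1) = ((k + 1 : Nat) : Int) := by push_cast; ring
      have hdint : (((k : Int) + 1) ∣ (m : Int)) ↔ ((k + 1) ∣ m) := by
        rw [hcast]; exact Int.natCast_dvd_natCast
      by_cases hd : (k + 1) ∣ m
      · simp [List.filter_singleton, hdint, hd]
      · simp [List.filter_singleton, hdint, hd]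

-- the divisors of m in [1, m/2] are exactly the proper divisors
lemma divisorSet (m : Nat) (hm : m ≠ 1) :
    (Finset.Icc 1 (m / 2)).filter (fun d => d ∣ m) = m.properDivisors := by
  ext d
  simp only [Finset.mem_filter, Finset.mem_Icc, Nat.mem_properDivisors]
  constructor
  · rintro ⟨⟨h1, h2⟩, h3⟩
    exact ⟨h3, by omega⟩
  · rintro ⟨h3, h2⟩
    have h1 : 1 ≤ d := by
      rcases Nat.eq_zero_or_pos d with rfl | h
      · rw [zero_dvd_iff] at h3; omega
      · exact h
    refine ⟨⟨h1, ?_⟩, h3⟩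
    rcases h3 with ⟨c, rfl⟩
    have hc : 2 ≤ c := by
      have hc0 : c ≠ 0 := by rintro rfl; simp at h2
      have hc1 : c ≠ 1 := by rintro rfl; simp at h2
      omega
    rw [Nat.le_div_iff_mul_le (by norm_num)]
    exact Nat.mul_le_mul_left d hc

-- f agrees with the reference function on natural arguments
lemma fA_eq (m : Nat) : f (m : Int) = pvF m := by
  induction m using Nat.strong_induction_on with
  | _ m IH =>
    by_cases hm : m = 1
    · subst hm
      rw [f, pvF]
      norm_num
    · have hm' : (m : Int) ≠ 1 := by exact_mod_cast hm
      rw [f, if_neg hm']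
      have hfd : PySem.Int.floordiv (m : Int) 2 = ((m / 2 : Nat) : Int) := by
        exact_mod_cast PySem.Int.floordiv_natCast m 2
      rw [hfd]
      have hattach : ∀ (b : Int) (l : List Int),
          l.attach.foldl
            (fun all i =>
              if PySem.Int.mod (m : Int) i.1 = 0 then
                if all - f i.1 < 0 then all - f i.1 + 2017 else all - f i.1
              else all) b
          = l.foldl
            (fun all i =>
              if PySem.Int.mod (m : Int) i = 0 then
                if all - f i < 0 then all - f i + 2017 else all - f i
              else all) b := by
        intro b l; simp
      rw [hattach]
      have hcong : ∀ (acc : Int), ∀ i ∈ PySem.List.pyRange 1 (((m / 2 : Nat) : Int) + 1) 1,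
          (fun all i =>
            if PySem.Int.mod (m : Int) i = 0 then
              if all - f i < 0 then all - f i + 2017 else all - f i
            else all) acc i
          = (fun all i =>
            if PySem.Int.mod (m : Int) i = 0 then
              if all - pvF i.toNat < 0 then all - pvF i.toNat + 2017 else all - pvF i.toNat
            else all) acc i := by
        intro acc i hi
        have h := PySem.List.mem_pyRange_one.mp hi
        have h3 : i.toNat < m := by omega
        have h4 : ((i.toNat : Nat) : Int) = i := Int.toNat_of_nonneg (by omega)
        have h5 : f i = pvF i.toNat := by rw [← h4]; exact IH _ h3
        simp only [h5]
      rw [PySem.List.foldl_congr_mem _ _ _ _ hcong]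
      rw [pyPow_natCast]
      rw [foldA (m : Int) (fun i => pvF i.toNat) _ _
        (PySem.Int.powMod_nonneg 2 m (by norm_num))
        (PySem.Int.powMod_lt 2 m (by norm_num))
        (fun i _ => ⟨pvF_nonneg _, pvF_lt _⟩)]
      rw [listsum_eq m pvF (m / 2), divisorSet m hm, pvF_eq m hm,
        PySem.Int.mod_eq_emod_of_pos (by norm_num)]
      exact Int.emod_emod_of_dvd _ dvd_rfl

-- B's while-loop, summed through g, is the paired divisor sum over Icc i √m
lemma loopS (m : Nat) (g : Nat → Int) : ∀ (k : Nat) (i : Nat) (acc : List Int),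
    1 ≤ i → m.sqrt + 1 - i = k →
    ((divLoop (m : Int) (i : Int) acc).map (fun d => g d.toNat)).sum
      = (acc.map (fun d => g d.toNat)).sum
        + ∑ j ∈ Finset.Icc i m.sqrt,
            (if j ∣ m then g j + (if m / j ≠ m ∧ m / j ≠ j then g (m / j) else 0) else 0) := by
  intro k
  induction k with
  | zero =>
      intro i acc hi hk
      have hgt : ¬ (i ≤ m.sqrt) := by omega
      have hii : ¬ ((i : Int) * (i : Int) ≤ (m : Int)) := by
        intro h
        exact hgt (Nat.le_sqrt.mpr (by exact_mod_cast h))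
      rw [divLoop, dif_neg hii, Finset.Icc_eq_empty (by omega)]
      simp
  | succ k ih =>
      intro i acc hi hk
      by_cases hle : i ≤ m.sqrt
      · have hii : ((i : Int) * (i : Int) ≤ (m : Int)) := by
          exact_mod_cast Nat.le_sqrt.mp hle
        rw [divLoop, dif_pos hii]
        have hICC : Finset.Icc i m.sqrt = insert i (Finset.Icc (i + 1) m.sqrt) := by
          ext x; simp only [Finset.mem_Icc, Finset.mem_insert]; omega
        have hnotmem : i ∉ Finset.Icc (i + 1) m.sqrt := by
          simp only [Finset.mem_Icc]; omega
        rw [hICC, Finset.sum_insert hnotmem]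
        have hfd : PySem.Int.floordiv (m : Int) (i : Int) = ((m / i : Nat) : Int) :=
          PySem.Int.floordiv_natCast m i
        have hmodc : PySem.Int.mod (m : Int) (i : Int) = ((m % i : Nat) : Int) :=
          PySem.Int.mod_natCast m i
        have hpc : ((i : Int) + 1) = ((i + 1 : Nat) : Int) := by push_cast; ring
        by_cases hdvd : i ∣ m
        · have hmod : PySem.Int.mod (m : Int) (i : Int) = 0 := by
            simp [hmodc, Nat.dvd_iff_mod_eq_zero.mp hdvd]
          rw [if_pos hmod, hpc, ih (i + 1) _ (by omega) (by omega), if_pos hdvd]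
          simp only [List.map_append, List.sum_append]
          rw [hfd]
          have hcast2 : ((((m / i : Nat) : Int) ≠ (m : Int)) ∧ (((m / i : Nat) : Int) ≠ (i : Int)))
              ↔ (m / i ≠ m ∧ m / i ≠ i) := by
            constructor
            · rintro ⟨h1, h2⟩; exact ⟨by exact_mod_cast h1, by exact_mod_cast h2⟩
            · rintro ⟨h1, h2⟩; exact ⟨by exact_mod_cast h1, by exact_mod_cast h2⟩
          by_cases hc : m / i ≠ m ∧ m / i ≠ i
          · rw [if_pos (hcast2.mpr hc), if_pos hc]
            simp only [List.map_cons, List.map_nil, List.sum_cons, List.sum_nil,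
              Int.toNat_natCast, add_zero]
            ring
          · rw [if_neg (fun hx => hc (hcast2.mp hx)), if_neg hc]
            simp only [List.map_cons, List.map_nil, List.sum_cons,
              List.sum_nil, Int.toNat_natCast, add_zero]
            ring
        · have hmod : ¬ PySem.Int.mod (m : Int) (i : Int) = 0 := by
            rw [hmodc]
            intro hx
            exact hdvd (Nat.dvd_iff_mod_eq_zero.mpr (by exact_mod_cast hx))
          rw [if_neg hmod, hpc, ih (i + 1) acc (by omega) (by omega), if_neg hdvd]
          ring
      · have hii : ¬ ((i : Int) * (i : Int) ≤ (m : Int)) := by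
          intro h
          exact hle (Nat.le_sqrt.mpr (by exact_mod_cast h))
        rw [divLoop, dif_neg hii, Finset.Icc_eq_empty (by omega)]
        simp

-- pairing small divisors with their cofactors gives all proper divisors
lemma pairS (m : Nat) (g : Nat → Int) (hm : m ≠ 1) :
    ∑ j ∈ Finset.Icc 1 m.sqrt,
        (if j ∣ m then g j + (if m / j ≠ m ∧ m / j ≠ j then g (m / j) else 0) else 0)
      = ∑ d ∈ m.properDivisors, g d := by
  rcases Nat.eq_zero_or_pos m with rfl | hm0
  · simp
  have hm2 : 2 ≤ m := by omega
  rw [← Finset.sum_filter]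
  have hS : (Finset.Icc 1 m.sqrt).filter (fun j => j ∣ m)
      = m.properDivisors.filter (fun d => d * d ≤ m) := by
    ext j
    simp only [Finset.mem_filter, Finset.mem_Icc, Nat.mem_properDivisors]
    constructor
    · rintro ⟨⟨h1, h2⟩, h3⟩
      have hjj : j * j ≤ m := Nat.le_sqrt.mp h2
      refine ⟨⟨h3, ?_⟩, hjj⟩
      rcases lt_or_ge j m with h | h
      · exact h
      · exfalso; nlinarith
    · rintro ⟨⟨h3, hlt⟩, hjj⟩
      have h1 : 1 ≤ j := by
        rcases Nat.eq_zero_or_pos j with rfl | h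
        · rw [zero_dvd_iff] at h3; omega
        · exact h
      exact ⟨⟨h1, Nat.le_sqrt.mpr hjj⟩, h3⟩
  rw [hS, Finset.sum_add_distrib,
    ← Finset.sum_filter (fun j => m / j ≠ m ∧ m / j ≠ j) (fun j => g (m / j))]
  have hbij : ∑ j ∈ (m.properDivisors.filter (fun d => d * d ≤ m)).filter
        (fun j => m / j ≠ m ∧ m / j ≠ j), g (m / j)
      = ∑ d ∈ m.properDivisors.filter (fun d => ¬ d * d ≤ m), g d := by
    apply Finset.sum_nbij' (i := fun j => m / j) (j := fun d => m / d)
    · intro a ha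
      simp only [Finset.mem_filter, Nat.mem_properDivisors] at ha ⊢
      obtain ⟨⟨⟨hdvd, hlt⟩, hjj⟩, hne1, hne2⟩ := ha
      have ha0 : 0 < a := Nat.pos_of_dvd_of_pos hdvd (by omega)
      have hk : a * (m / a) = m := Nat.mul_div_cancel' hdvd
      have hak : a ≤ m / a := by nlinarith
      have halt : a < m / a := by
        rcases Nat.lt_or_ge a (m / a) with h | h
        · exact h
        · exact absurd (le_antisymm hak h) (Ne.symm hne2)
      refine ⟨⟨Nat.div_dvd_of_dvd hdvd, ?_⟩, ?_⟩
      · have := Nat.div_le_self m a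
        omega
      · intro hcon; nlinarith
    · intro d hd
      simp only [Finset.mem_filter, Nat.mem_properDivisors] at hd ⊢
      obtain ⟨⟨hdvd, hlt⟩, hgt⟩ := hd
      rw [Nat.not_le] at hgt
      have hd0 : 0 < d := Nat.pos_of_dvd_of_pos hdvd (by omega)
      have he : d * (m / d) = m := Nat.mul_div_cancel' hdvd
      have hed : m / d < d := by nlinarith
      have he0 : 0 < m / d := by nlinarith
      have hmd : m / (m / d) = d := Nat.div_div_self hdvd (by omega)
      refine ⟨⟨⟨Nat.div_dvd_of_dvd hdvd, ?_⟩, by nlinarith⟩, ?_, ?_⟩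
      · omega
      · rw [hmd]; omega
      · rw [hmd]; omega
    · intro a ha
      simp only [Finset.mem_filter, Nat.mem_properDivisors] at ha
      exact Nat.div_div_self ha.1.1.1 (by omega)
    · intro d hd
      simp only [Finset.mem_filter, Nat.mem_properDivisors] at hd
      exact Nat.div_div_self hd.1.1 (by omega)
    · intro a _
      rfl
  rw [hbij]
  exact Finset.sum_filter_add_sum_filter_not _ _ g

-- f_alt agrees with the reference function on natural arguments
lemma fB_eq (m : Nat) : f_alt (m : Int) = pvF m := by
  induction m using Nat.strong_induction_on with
  | _ m IH =>
    by_cases hm : m = 1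
    · subst hm
      rw [f_alt, pvF]
      norm_num
    · have hm' : (m : Int) ≠ 1 := by exact_mod_cast hm
      rw [f_alt, dif_neg hm']
      have hattach : ((divLoop (m : Int) 1 []).attach.map (fun d => f_alt d.1)).sum
          = ((divLoop (m : Int) 1 []).map f_alt).sum := by simp
      rw [hattach]
      have hcong : ∀ d ∈ divLoop (m : Int) 1 [], f_alt d = pvF d.toNat := by
        intro d hd
        have hb := mem_divLoop' (m : Int) hm' d hd
        have h3 : d.toNat < m := by omega
        have h4 : ((d.toNat : Nat) : Int) = d := Int.toNat_of_nonneg (by omega)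
        rw [← h4]
        exact IH _ h3
      rw [List.map_congr_left hcong]
      rw [show (1 : Int) = ((1 : Nat) : Int) by norm_num]
      rw [loopS m pvF (m.sqrt + 1 - 1) 1 [] (le_refl 1) rfl]
      rw [pairS m pvF hm]
      rw [pyPow_natCast, pvF_eq m hm, PySem.Int.mod_eq_emod_of_pos (by norm_num)]
      simp

-- on negative arguments both loops are empty
lemma f_neg (n : Int) (hn : n < 0) : f n = f_alt n := by
  have hn1 : n ≠ 1 := by omega
  rw [f, if_neg hn1, f_alt, dif_neg hn1]
  have hr : PySem.List.pyRange 1 (PySem.Int.floordiv n 2 + 1) 1 = [] := by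
    apply PySem.List.pyRange_one_eq_nil
    have h2 : PySem.Int.floordiv n 2 = n / 2 := PySem.Int.floordiv_eq_ediv_of_pos (by norm_num)
    rw [h2]; omega
  have hd : divLoop n 1 [] = [] := by
    rw [divLoop, dif_neg (by omega : ¬ ((1 : Int) * 1 ≤ n))]
  rw [hr, hd]
  simp

-- ===== VERDICT (by name: the statement is the Claim_ definition above) =====
theorem f_spec : Claim_equal_f := by
  intro n _
  unfold Spec_f
  rcases lt_or_ge n 0 with h | h
  · exact f_neg n h
  · have hcast : n = ((n.toNat : Nat) : Int) := (Int.toNat_of_nonneg h).symm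
    rw [hcast, fA_eq, fB_eq]
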